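-- pv_equiv track=rewrite | github.com/Roy-lab/scMTNI | Scripts/genPriorNetwork/mapMot2Gene.py | makeNet
-- ===== SOURCE A (Python) =====
-- def makeNet(mot2peak,mot2tf,peak2gene):
-- 	net = {}
-- 	for (mot,peak,v) in mot2peak:
-- 		if mot not in mot2tf:
-- 			continue
-- 		if peak not in peak2gene:
-- 			continue
-- 		tfs = mot2tf[mot]
-- 		genes = peak2gene[peak]
-- 		for tf in tfs:
-- 			for gene in genes:
-- 				if (tf,gene) not in net:
-- 					net[(tf,gene)] = v
-- 				else:
-- 					if v > net[(tf,gene)]: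
-- 						net[(tf,gene)] = v
-- 	return net
-- ===== SOURCE B (Python) =====
-- def makeNet(mot2peak, mot2tf, peak2gene):
--     # Flatten to (tf,gene)->score pairs, group scores per edge, then reduce with max.
--     pairs = [((tf, gene), v)
--              for (mot, peak, v) in mot2peak
--              if mot in mot2tf and peak in peak2gene
--              for tf in mot2tf[mot]
--              for gene in peak2gene[peak]]
--     acc = {}
--     for key, v in pairs:
--         acc.setdefault(key, []).append(v)
--     return {key: max(vals) for key, vals in acc.items()}
-- ===== Notes on version B (the rewrite author's own statement) =====
-- stated objective: alternative
-- what changed: B separates the work into three phases - flatten all (tf,gene,score) pairs into one list, group the scores per (tf,gene) key, then reduce each group with max - instead of A's in-place running-maximum update inside triply nested loops.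
import Mathlib
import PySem

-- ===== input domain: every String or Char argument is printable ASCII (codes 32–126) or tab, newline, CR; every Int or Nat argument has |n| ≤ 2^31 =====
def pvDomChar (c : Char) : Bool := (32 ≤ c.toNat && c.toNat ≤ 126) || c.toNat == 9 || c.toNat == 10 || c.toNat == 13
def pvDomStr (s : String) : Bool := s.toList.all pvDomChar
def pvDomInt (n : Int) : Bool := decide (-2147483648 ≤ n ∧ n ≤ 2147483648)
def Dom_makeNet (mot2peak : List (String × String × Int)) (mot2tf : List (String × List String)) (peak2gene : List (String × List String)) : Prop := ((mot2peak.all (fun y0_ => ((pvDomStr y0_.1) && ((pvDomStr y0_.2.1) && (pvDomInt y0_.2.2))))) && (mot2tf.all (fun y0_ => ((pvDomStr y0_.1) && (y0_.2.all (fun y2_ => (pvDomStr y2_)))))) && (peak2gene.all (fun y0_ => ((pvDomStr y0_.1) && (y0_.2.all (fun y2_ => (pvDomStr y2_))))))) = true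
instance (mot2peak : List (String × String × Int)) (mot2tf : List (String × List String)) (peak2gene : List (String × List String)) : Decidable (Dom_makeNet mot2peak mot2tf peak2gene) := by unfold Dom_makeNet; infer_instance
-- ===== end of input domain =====

-- B replaces A's in-place running-maximum dict update inside triply nested loops by a
-- flatten / group / reduce-with-max pipeline (alternative decomposition, same cost).


-- ===== PORT A =====
-- body of A's innermost loop: insert if absent, else keep the larger score
def pvStepA (net : PySem.Dict (String × String) Int) (k : String × String) (v : Int) : PySem.Dict (String × String) Int :=
  match net.get? k with
  | none => net.insert k v
  | some w => if v > w then net.insert k v else net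

def makeNet (mot2peak : List (String × String × Int)) (mot2tf : List (String × List String)) (peak2gene : List (String × List String)) : List (String × String × Int) :=
  (mot2peak.foldl (fun net t =>
    match (PySem.Dict.mk mot2tf).get? t.1 with
    | none => net
    | some tfs =>
      match (PySem.Dict.mk peak2gene).get? t.2.1 with
      | none => net
      | some genes =>
          tfs.foldl (fun net tf => genes.foldl (fun net gene => pvStepA net (tf, gene) t.2.2) net) net)
    PySem.Dict.empty).items.map (fun q => (q.1.1, q.1.2, q.2))

-- ===== PORT B =====
-- the flattened list comprehension of Source B
def pvPairs (mot2peak : List (String × String × Int)) (mot2tf : List (String × List String)) (peak2gene : List (String × List String)) : List ((String × String) × Int) :=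
  mot2peak.flatMap (fun t =>
    match (PySem.Dict.mk mot2tf).get? t.1, (PySem.Dict.mk peak2gene).get? t.2.1 with
    | some tfs, some genes => tfs.flatMap (fun tf => genes.map (fun gene => ((tf, gene), t.2.2)))
    | _, _ => [])

-- max(vals) for the nonempty grouped lists (Python max raises on []; never reached)
def pvMaxOf (vals : List Int) : Int :=
  match vals with
  | [] => 0
  | x :: t => t.foldl max x

def makeNet_alt (mot2peak : List (String × String × Int)) (mot2tf : List (String × List String)) (peak2gene : List (String × List String)) : List (String × String × Int) :=
  ((pvPairs mot2peak mot2tf peak2gene).foldl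
      (fun d p => d.modify p.1 [] (fun vs => vs ++ [p.2])) PySem.Dict.empty).items.map
    (fun q => (q.1.1, q.1.2, pvMaxOf q.2))

-- ===== PRECONDITION & SPEC =====
def Spec_makeNet (mot2peak : List (String × String × Int)) (mot2tf : List (String × List String)) (peak2gene : List (String × List String)) (out : List (String × String × Int)) : Prop := out = makeNet_alt mot2peak mot2tf peak2gene
instance (mot2peak : List (String × String × Int)) (mot2tf : List (String × List String)) (peak2gene : List (String × List String)) (out : List (String × String × Int)) : Decidable (Spec_makeNet mot2peak mot2tf peak2gene out) := by unfold Spec_makeNet; infer_instance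

-- ===== CLAIM (what is proved, stated in full; the proofs are below) =====
def Claim_equal_makeNet : Prop := ∀ (mot2peak : List (String × String × Int)) (mot2tf : List (String × List String)) (peak2gene : List (String × List String)), Dom_makeNet mot2peak mot2tf peak2gene → Spec_makeNet mot2peak mot2tf peak2gene (makeNet mot2peak mot2tf peak2gene)

-- ===== LEMMAS AND PROOFS =====

-- the simulation invariant: A's dict is B's group dict with every group reduced by max
def pvR (net : PySem.Dict (String × String) Int) (acc : PySem.Dict (String × String) (List Int)) : Prop :=
  net.items = acc.items.map (fun q => (q.1, pvMaxOf q.2)) ∧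
  (∀ q ∈ acc.items, q.2 ≠ []) ∧
  (acc.items.map Prod.fst).Nodup

theorem pvMaxOf_append (vals : List Int) (v : Int) (h : vals ≠ []) :
    pvMaxOf (vals ++ [v]) = max (pvMaxOf vals) v := by
  cases vals with
  | nil => exact absurd rfl h
  | cons x t => simp [pvMaxOf, List.foldl_append]

theorem pv_eq_of_fst_eq {α β : Type} (l : List (α × β)) (h : (l.map Prod.fst).Nodup)
    (q q' : α × β) (hq : q ∈ l) (hq' : q' ∈ l) (hfst : q.1 = q'.1) : q = q' := by
  induction l with
  | nil => cases hq
  | cons x t ih =>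
    simp only [List.map_cons, List.nodup_cons] at h
    rcases List.mem_cons.mp hq with rfl | hq2
    · rcases List.mem_cons.mp hq' with rfl | hq2'
      · rfl
      · exact absurd (by rw [hfst]; exact List.mem_map_of_mem (f := Prod.fst) hq2') h.1
    · rcases List.mem_cons.mp hq' with rfl | hq2'
      · exact absurd (by rw [← hfst]; exact List.mem_map_of_mem (f := Prod.fst) hq2) h.1
      · exact ih h.2 hq2 hq2'

theorem pv_get?_sim (net : PySem.Dict (String × String) Int) (acc : PySem.Dict (String × String) (List Int))
    (h : net.items = acc.items.map (fun q => (q.1, pvMaxOf q.2))) (k : String × String) :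
    net.get? k = (acc.get? k).map pvMaxOf := by
  simp only [PySem.Dict.get?, h, List.find?_map, Option.map_map]
  rfl

theorem pv_contains_sim (net : PySem.Dict (String × String) Int) (acc : PySem.Dict (String × String) (List Int))
    (h : net.items = acc.items.map (fun q => (q.1, pvMaxOf q.2))) (k : String × String) :
    net.contains k = acc.contains k := by
  simp only [PySem.Dict.contains, h, List.any_map]
  rfl

theorem pvR_step (net : PySem.Dict (String × String) Int) (acc : PySem.Dict (String × String) (List Int))
    (h : pvR net acc) (k : String × String) (v : Int) :
    pvR (pvStepA net k v) (acc.modify k [] (fun vs => vs ++ [v])) := by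
  obtain ⟨h1, h2, h3⟩ := h
  have hget := pv_get?_sim net acc h1 k
  have hcon := pv_contains_sim net acc h1 k
  rcases hacc : acc.get? k with _ | vals
  · -- key absent on both sides: both append a fresh entry
    have hconF : acc.contains k = false := by
      rw [PySem.Dict.contains_eq_isSome_get?, hacc]; rfl
    have hnet : net.get? k = none := by rw [hget, hacc]; rfl
    have hnetF : net.contains k = false := hcon.trans hconF
    have hknot : k ∉ acc.items.map Prod.fst := by
      intro hk
      have : acc.contains k = true := by
        simp only [PySem.Dict.contains, List.any_eq_true]
        rcases List.mem_map.mp hk with ⟨q, hq, hq1⟩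
        exact ⟨q, hq, by simp [hq1]⟩
      simp [this] at hconF
    have hmod : acc.modify k [] (fun vs => vs ++ [v]) = acc.insert k [v] := by
      simp [PySem.Dict.modify, PySem.Dict.getD, hacc]
    rw [hmod]
    unfold pvStepA
    rw [hnet]
    refine ⟨?_, ?_, ?_⟩
    · rw [PySem.Dict.items_insert_of_not_contains _ _ hnetF,
        PySem.Dict.items_insert_of_not_contains _ _ hconF, List.map_append, h1]
      rfl
    · intro q hq
      rw [PySem.Dict.items_insert_of_not_contains _ _ hconF] at hq
      rcases List.mem_append.mp hq with hq | hq
      · exact h2 q hq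
      · simp at hq; subst hq; simp
    · rw [PySem.Dict.items_insert_of_not_contains _ _ hconF, List.map_append]
      rw [List.nodup_append]
      refine ⟨h3, ⟨by simp, ?_⟩⟩
      intro a ha b hb
      simp only [List.map_cons, List.map_nil, List.mem_singleton] at hb
      subst hb
      intro hab
      exact hknot (hab ▸ ha)
  · -- key present: B appends v to the group, A takes the max in place
    rcases hfind : acc.items.find? (fun p => p.1 == k) with _ | q0
    · exfalso; simp [PySem.Dict.get?, hfind] at hacc
    have hq0mem : q0 ∈ acc.items := List.mem_of_find?_eq_some hfind
    have hq0k : q0.1 = k := by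
      have := List.find?_some hfind
      simpa using this
    have hq0v : q0.2 = vals := by
      simp [PySem.Dict.get?, hfind] at hacc; exact hacc
    have hvne : vals ≠ [] := hq0v ▸ h2 q0 hq0mem
    have hconT : acc.contains k = true := by
      simp only [PySem.Dict.contains, List.any_eq_true]
      exact ⟨q0, hq0mem, by simp [hq0k]⟩
    have hnetT : net.contains k = true := hcon.trans hconT
    have hnet : net.get? k = some (pvMaxOf vals) := by rw [hget, hacc]; rfl
    have hmod : acc.modify k [] (fun vs => vs ++ [v]) = acc.insert k (vals ++ [v]) := by
      simp [PySem.Dict.modify, PySem.Dict.getD, hacc]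
    have hBitems : (acc.insert k (vals ++ [v])).items
        = acc.items.map (fun p => if p.1 == k then (k, vals ++ [v]) else p) :=
      PySem.Dict.items_insert_of_contains _ _ hconT
    rw [hmod]
    unfold pvStepA
    rw [hnet]
    have hfstB : ((acc.insert k (vals ++ [v])).items.map Prod.fst) = acc.items.map Prod.fst := by
      rw [hBitems, List.map_map]
      apply List.map_congr_left
      intro q hq
      by_cases hqk : q.1 = k <;> simp [hqk]
    have h2' : ∀ q ∈ (acc.insert k (vals ++ [v])).items, q.2 ≠ [] := by
      intro q hq
      rw [hBitems] at hq
      rcases List.mem_map.mp hq with ⟨q', hq', hqe⟩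
      by_cases hqk : q'.1 = k
      · simp [hqk] at hqe; subst hqe; simp
      · simp [hqk] at hqe; subst hqe; exact h2 q' hq'
    by_cases hgt : v > pvMaxOf vals
    · simp only [hgt, if_true]
      refine ⟨?_, h2', by rw [hfstB]; exact h3⟩
      rw [PySem.Dict.items_insert_of_contains _ _ hnetT, hBitems, h1, List.map_map, List.map_map]
      apply List.map_congr_left
      intro q hq
      by_cases hqk : q.1 = k
      · have hq2 : q.2 = vals := by
          have := pv_eq_of_fst_eq acc.items h3 q q0 hq hq0mem (hqk.trans hq0k.symm)
          rw [this, hq0v]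
        simp only [Function.comp]
        simp [hqk, pvMaxOf_append vals v hvne, max_eq_right (le_of_lt hgt)]
      · simp only [Function.comp]
        simp [hqk]
    · simp only [hgt, if_false]
      refine ⟨?_, h2', by rw [hfstB]; exact h3⟩
      rw [hBitems, h1, List.map_map]
      apply List.map_congr_left
      intro q hq
      by_cases hqk : q.1 = k
      · have hq2 : q.2 = vals := by
          have := pv_eq_of_fst_eq acc.items h3 q q0 hq hq0mem (hqk.trans hq0k.symm)
          rw [this, hq0v]
        simp only [Function.comp]
        simp [hqk, pvMaxOf_append vals v hvne, max_eq_left (le_of_not_gt hgt), hq2]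
      · simp only [Function.comp]
        simp [hqk]

theorem pvR_fold (L : List ((String × String) × Int))
    (net : PySem.Dict (String × String) Int) (acc : PySem.Dict (String × String) (List Int))
    (h : pvR net acc) :
    pvR (L.foldl (fun n p => pvStepA n p.1 p.2) net)
        (L.foldl (fun d p => d.modify p.1 [] (fun vs => vs ++ [p.2])) acc) := by
  induction L generalizing net acc with
  | nil => exact h
  | cons p t ih => exact ih _ _ (pvR_step net acc h p.1 p.2)

theorem pvA_fold_eq_pairs (mot2peak : List (String × String × Int)) (mot2tf : List (String × List String)) (peak2gene : List (String × List String))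
    (net : PySem.Dict (String × String) Int) :
    mot2peak.foldl (fun net t =>
      match (PySem.Dict.mk mot2tf).get? t.1 with
      | none => net
      | some tfs =>
        match (PySem.Dict.mk peak2gene).get? t.2.1 with
        | none => net
        | some genes =>
            tfs.foldl (fun net tf => genes.foldl (fun net gene => pvStepA net (tf, gene) t.2.2) net) net) net
    = (pvPairs mot2peak mot2tf peak2gene).foldl (fun n p => pvStepA n p.1 p.2) net := by
  rw [pvPairs, List.foldl_flatMap]
  apply PySem.List.foldl_congr_mem
  intro acc t _
  rcases hm : (PySem.Dict.mk mot2tf).get? t.1 with _ | tfs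
  · rfl
  rcases hp : (PySem.Dict.mk peak2gene).get? t.2.1 with _ | genes
  · rfl
  simp only [List.foldl_flatMap, List.foldl_map]

-- ===== VERDICT (by name: the statement is the Claim_ definition above) =====
theorem makeNet_spec : Claim_equal_makeNet := by
  intro mot2peak mot2tf peak2gene _
  unfold Spec_makeNet makeNet makeNet_alt
  rw [pvA_fold_eq_pairs]
  have := pvR_fold (pvPairs mot2peak mot2tf peak2gene) PySem.Dict.empty PySem.Dict.empty
    ⟨rfl, by simp [PySem.Dict.empty], by simp [PySem.Dict.empty]⟩
  obtain ⟨h1, -, -⟩ := this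
  rw [h1, List.map_map]
  rfl
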